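-- pv_equiv track=rewrite | github.com/LukasHoste/algorithms-intro-excercises-tests | excercise2.py | sumOfLucas
-- ===== SOURCE A (Python) =====
-- def sumOfLucas(highestNumber):
--   current =1
--   sum =2
--   while(current < highestNumber):
--     nextNumber = luc(current)
--     if nextNumber %2 ==0:
--       sum += nextNumber
--     current += 1
--   return sum
--
-- def luc(n):
--   if n == 0:
--     return 2
--   elif n == 1:
--     return 1
--   else:
--     return luc(n-1) + luc(n-2)
-- ===== SOURCE B (Python) =====
-- def sumOfLucas(highestNumber):
--   total = 2
--   a, b = 2, 1  # luc(0), luc(1)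
--   current = 1
--   while current < highestNumber:
--     if b % 2 == 0:
--       total += b
--     a, b = b, a + b
--     current += 1
--   return total
-- ===== Notes on version B (the rewrite author's own statement) =====
-- stated objective: faster
-- what changed: B replaces the per-index exponential naive Lucas recursion with a single pass maintaining the running pair (luc(i-1), luc(i)), accumulating even terms as it goes; intended as asymptotically faster (a timing run could not measure a ratio: A already timed out at n=16 where B returned instantly).
import Mathlib
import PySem

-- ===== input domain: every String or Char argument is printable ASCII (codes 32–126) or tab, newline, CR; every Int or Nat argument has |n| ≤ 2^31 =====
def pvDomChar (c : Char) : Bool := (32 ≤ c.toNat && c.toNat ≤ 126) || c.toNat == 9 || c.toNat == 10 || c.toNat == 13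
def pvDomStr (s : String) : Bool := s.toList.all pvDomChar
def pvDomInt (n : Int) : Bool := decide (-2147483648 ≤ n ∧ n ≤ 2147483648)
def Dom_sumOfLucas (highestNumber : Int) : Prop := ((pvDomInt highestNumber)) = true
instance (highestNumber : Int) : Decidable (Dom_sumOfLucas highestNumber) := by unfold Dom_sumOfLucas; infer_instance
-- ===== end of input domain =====

-- B replaces A's per-index exponential naive Lucas recursion by one pass keeping the
-- running pair (luc(i-1), luc(i)) and accumulating even terms; intended as faster
-- (timing: A timed out at n=16 where B returned, so no ratio was measurable).

-- ===== PORT A =====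
-- A's helper luc; A only ever calls it with current ≥ 1, so a Nat-indexed
-- transcription of the same double recursion is exact here.
def lucA : Nat → Int
  | 0 => 2
  | 1 => 1
  | n + 2 => lucA (n + 1) + lucA n

-- A's while loop; fuel = (highestNumber - current).toNat, same state (current, sum).
def lucLoopA : Nat → Int → Int → Int
  | 0, _, sum => sum
  | f + 1, current, sum =>
    let nextNumber := lucA current.toNat
    lucLoopA f (current + 1) (if nextNumber % 2 = 0 then sum + nextNumber else sum)

def sumOfLucas (highestNumber : Int) : Int :=
  lucLoopA (highestNumber - 1).toNat 1 2

-- ===== PORT B =====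
-- B's while loop: running pair (a, b) = (luc(i-1), luc(i)), accumulator total.
def lucLoopB : Nat → Int → Int → Int → Int
  | 0, _, _, total => total
  | f + 1, a, b, total =>
    lucLoopB f b (a + b) (if b % 2 = 0 then total + b else total)

def sumOfLucas_alt (highestNumber : Int) : Int :=
  lucLoopB (highestNumber - 1).toNat 2 1 2

-- ===== PRECONDITION & SPEC =====
def Spec_sumOfLucas (highestNumber : Int) (out : Int) : Prop := out = sumOfLucas_alt highestNumber
instance (highestNumber : Int) (out : Int) : Decidable (Spec_sumOfLucas highestNumber out) := by unfold Spec_sumOfLucas; infer_instance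

-- ===== CLAIM (what is proved, stated in full; the proofs are below) =====
def Claim_equal_sumOfLucas : Prop := ∀ (highestNumber : Int), Dom_sumOfLucas highestNumber → Spec_sumOfLucas highestNumber (sumOfLucas highestNumber)

-- ===== LEMMAS AND PROOFS =====

-- A's loop at current = k+1 equals B's loop carrying the pair (lucA k, lucA (k+1)).
lemma lucLoop_eq (f : Nat) : ∀ (k : Nat) (sum : Int),
    lucLoopA f ((k + 1 : Nat) : Int) sum = lucLoopB f (lucA k) (lucA (k + 1)) sum := by
  induction f with
  | zero => intro k sum; rfl
  | succ f ih =>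
    intro k sum
    simp only [lucLoopA, lucLoopB, Int.toNat_natCast]
    have h1 : ((k + 1 : Nat) : Int) + 1 = ((k + 2 : Nat) : Int) := by push_cast; ring
    have h2 : lucA k + lucA (k + 1) = lucA (k + 2) := by
      simp [lucA]; ring
    rw [h1, h2]
    exact ih (k + 1) _

-- ===== VERDICT (by name: the statement is the Claim_ definition above) =====
theorem sumOfLucas_spec : Claim_equal_sumOfLucas := by
  intro h _
  unfold Spec_sumOfLucas sumOfLucas sumOfLucas_alt
  have := lucLoop_eq (h - 1).toNat 0 2
  simpa [lucA] using this
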